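-- pv_equiv track=rewrite | github.com/TimD1/nPoRe | aln.py | get_hp_lengths
-- ===== SOURCE A (Python) =====
-- def get_hp_lengths(seq):
--     ''' Calculate HP length of substring starting at each index. '''
--
--     # TODO: make this more efficient
--     hp_lens = [0]*(len(seq))
--     for start in range(len(seq)):
--         for stop in range(start+1, len(seq)):
--             if seq[stop] != seq[start]:
--                 hp_lens[start] = stop - start
--                 break
--     if len(seq):
--         hp_lens[-1] += 1
--     return hp_lens
-- ===== SOURCE B (Python) =====
-- def get_hp_lengths(seq):
--     ''' Calculate HP length of substring starting at each index. '''
--     # hp_lens[i] = distance from i to the next character differing from seq[i]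
--     # (0 if none); the final index counts itself.
--     n = len(seq)
--     hp_lens = [0] * n
--     for i in range(n - 2, -1, -1):
--         if seq[i] != seq[i + 1]:
--             hp_lens[i] = 1
--         elif hp_lens[i + 1]:
--             hp_lens[i] = hp_lens[i + 1] + 1
--     if n:
--         hp_lens[-1] += 1
--     return hp_lens
-- ===== Notes on version B (the rewrite author's own statement) =====
-- stated objective: faster
-- what changed: A scans forward from every index with a nested loop; B computes the same distance-to-next-different-character values in one backward dynamic-programming pass, extending each value from its right neighbour.
import Mathlib
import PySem

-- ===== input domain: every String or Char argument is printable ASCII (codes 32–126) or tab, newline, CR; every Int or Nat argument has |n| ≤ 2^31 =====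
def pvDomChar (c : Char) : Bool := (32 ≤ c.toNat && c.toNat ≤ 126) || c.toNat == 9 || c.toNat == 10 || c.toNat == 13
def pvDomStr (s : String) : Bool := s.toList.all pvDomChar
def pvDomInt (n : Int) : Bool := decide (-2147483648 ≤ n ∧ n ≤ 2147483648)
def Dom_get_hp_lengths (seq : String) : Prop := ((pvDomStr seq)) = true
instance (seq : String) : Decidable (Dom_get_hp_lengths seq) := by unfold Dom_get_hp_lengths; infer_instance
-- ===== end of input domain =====

-- B replaces A's per-index forward scan (nested loops) by one backward dynamic-programming pass
-- computing the same distance-to-next-different-character values (objective: faster).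

-- ===== PORT A =====
-- inner 'for stop in range(start+1, len(seq)): if seq[stop] != seq[start]: hp_lens[start] = stop - start; break'
def pvAInner (cs : List Char) (start : Int) (stops : List Int) (hp : List Int) : List Int :=
  match stops with
  | [] => hp
  | stop :: rest =>
    if PySem.List.pyGet? cs stop ≠ PySem.List.pyGet? cs start then
      PySem.List.pySetD hp start (stop - start)
    else pvAInner cs start rest hp

def get_hp_lengths (seq : String) : List Int :=
  let cs := seq.toList
  let n : Int := (cs.length : Int)
  let hp := (PySem.List.pyRange 0 n 1).foldl
    (fun hp start => pvAInner cs start (PySem.List.pyRange (start + 1) n 1) hp)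
    (List.replicate cs.length 0)
  if cs.length ≠ 0 then
    PySem.List.pySetD hp (-1) (PySem.List.pyGetD hp (-1) 0 + 1)
  else hp

-- ===== PORT B =====
-- 'for i in range(n-2, -1, -1): if seq[i] != seq[i+1]: hp[i] = 1 elif hp[i+1]: hp[i] = hp[i+1]+1'
def get_hp_lengths_alt (seq : String) : List Int :=
  let cs := seq.toList
  let n := cs.length
  let hp := (PySem.List.pyRange ((n : Int) - 2) (-1) (-1)).foldl
    (fun hp i =>
      if PySem.List.pyGet? cs i ≠ PySem.List.pyGet? cs (i + 1) then
        PySem.List.pySetD hp i 1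
      else if PySem.List.pyGetD hp (i + 1) 0 ≠ 0 then
        PySem.List.pySetD hp i (PySem.List.pyGetD hp (i + 1) 0 + 1)
      else hp)
    (List.replicate n 0)
  if n ≠ 0 then
    PySem.List.pySetD hp (-1) (PySem.List.pyGetD hp (-1) 0 + 1)
  else hp

-- ===== PRECONDITION & SPEC =====
def Spec_get_hp_lengths (seq : String) (out : List Int) : Prop := out = get_hp_lengths_alt seq
instance (seq : String) (out : List Int) : Decidable (Spec_get_hp_lengths seq out) := by
  unfold Spec_get_hp_lengths; infer_instance

-- ===== CLAIM (what is proved, stated in full; the proofs are below) =====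
def Claim_equal_get_hp_lengths : Prop :=
  ∀ (seq : String), Dom_get_hp_lengths seq → Spec_get_hp_lengths seq (get_hp_lengths seq)

-- ===== LEMMAS AND PROOFS =====

-- distance from position of c to the first differing char in the rest l; 0 if none differs
def pvFd (c : Char) : List Char → Int
  | [] => 0
  | d :: tl => if d ≠ c then 1 else if pvFd c tl = 0 then 0 else pvFd c tl + 1

def pvCh (cs : List Char) (i : Nat) : Char := cs.getD i default

def pvFdAt (cs : List Char) (i : Nat) : Int := pvFd (pvCh cs i) (cs.drop (i + 1))

-- first k values A's outer loop has computed
def pvCore (cs : List Char) (k : Nat) : List Int := (List.range k).map (pvFdAt cs)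

-- the values at indices k, k+1, …, already computed by B's backward loop
def pvTail (cs : List Char) (k : Nat) : List Int :=
  (List.range (cs.length - k)).map (fun t => pvFdAt cs (k + t))

theorem pvFd_nonneg (c : Char) (l : List Char) : 0 ≤ pvFd c l := by
  induction l with
  | nil => simp [pvFd]
  | cons d tl ih => simp only [pvFd]; split_ifs <;> omega

theorem pvGet_getD (cs : List Char) (m : Nat) (h : m < cs.length) :
    PySem.List.pyGet? cs (m : Int) = some (pvCh cs m) := by
  simp [PySem.List.pyGet?_natCast, List.getElem?_eq_getElem h, pvCh, List.getD]

theorem pvDrop_cons (cs : List Char) (m : Nat) (h : m < cs.length) :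
    cs.drop m = pvCh cs m :: cs.drop (m + 1) := by
  rw [List.drop_eq_getElem_cons h]; simp [pvCh, List.getD, List.getElem?_eq_getElem h]

theorem pvSet_mid (xs : List Int) (k : Nat) (h : xs.length = k) (y : Int) (ys : List Int) (v : Int) :
    (xs ++ y :: ys).set k v = xs ++ v :: ys := by
  subst h
  induction xs with
  | nil => simp
  | cons x xs ih => simpa using ih

theorem pvGet_mid (xs : List Int) (k : Nat) (h : xs.length = k) (y : Int) (ys : List Int) :
    (xs ++ y :: ys).getD k 0 = y := by
  subst h
  induction xs with
  | nil => simp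
  | cons x xs ih => simp [ih]

theorem pvCore_succ (cs : List Char) (k : Nat) :
    pvCore cs (k + 1) = pvCore cs k ++ [pvFdAt cs k] := by
  simp [pvCore, List.range_succ]

-- inner loop: sets index 'start' to the distance to the first differing char, if any
theorem pvAInner_eq (cs : List Char) (start : Nat) (hs : start < cs.length) :
    ∀ (fuel m : Nat), start < m → cs.length ≤ m + fuel → ∀ hp : List Int,
    pvAInner cs (start : Int) (PySem.List.pyRange (m : Int) (cs.length : Int) 1) hp =
      (if pvFd (pvCh cs start) (cs.drop m) = 0 then hp
       else hp.set start ((m : Int) + pvFd (pvCh cs start) (cs.drop m) - 1 - start)) := by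
  intro fuel
  induction fuel with
  | zero =>
    intro m hm hle hp
    have hge : cs.length ≤ m := by omega
    rw [PySem.List.pyRange_one_eq_nil (by exact_mod_cast hge), List.drop_eq_nil_of_le hge]
    simp [pvAInner, pvFd]
  | succ fuel ih =>
    intro m hm hle hp
    by_cases hcase : cs.length ≤ m
    · rw [PySem.List.pyRange_one_eq_nil (by exact_mod_cast hcase), List.drop_eq_nil_of_le hcase]
      simp [pvAInner, pvFd]
    · have hmlt : m < cs.length := by omega
      rw [PySem.List.pyRange_one_cons (by exact_mod_cast hmlt)]
      simp only [pvAInner]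
      rw [pvGet_getD cs m hmlt, pvGet_getD cs start hs, pvDrop_cons cs m hmlt]
      by_cases hne : pvCh cs m = pvCh cs start
      · rw [if_neg (by simp [hne])]
        have hc : ((m : Int) + 1) = ((m + 1 : Nat) : Int) := by push_cast; ring
        rw [hc, ih (m + 1) (by omega) (by omega) hp]
        have hfd : pvFd (pvCh cs start) (pvCh cs m :: cs.drop (m + 1)) =
            if pvFd (pvCh cs start) (cs.drop (m + 1)) = 0 then 0
            else pvFd (pvCh cs start) (cs.drop (m + 1)) + 1 := by
          simp [pvFd, hne]
        rw [hfd]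
        by_cases hz : pvFd (pvCh cs start) (cs.drop (m + 1)) = 0
        · simp [hz]
        · have hnn := pvFd_nonneg (pvCh cs start) (cs.drop (m + 1))
          rw [if_neg hz, if_neg hz, if_neg (by omega)]
          congr 1
          push_cast; ring
      · rw [if_pos (by simp [hne]), PySem.List.pySetD_natCast]
        have h1 : pvFd (pvCh cs start) (pvCh cs m :: cs.drop (m + 1)) = 1 := by
          simp [pvFd, hne]
        rw [h1, if_neg (by omega)]
        congr 1
        ring

-- outer loop: fills indices k, k+1, … of the zero-initialised array with pvFdAt values
theorem pvOuter_eq (cs : List Char) :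
    ∀ (fuel k : Nat), k ≤ cs.length → cs.length ≤ k + fuel →
    ((PySem.List.pyRange (k : Int) (cs.length : Int) 1).foldl
      (fun hp start => pvAInner cs start (PySem.List.pyRange (start + 1) (cs.length : Int) 1) hp)
      (pvCore cs k ++ List.replicate (cs.length - k) 0)) = pvCore cs cs.length := by
  intro fuel
  induction fuel with
  | zero =>
    intro k hk hle
    have : k = cs.length := by omega
    subst this
    rw [PySem.List.pyRange_one_eq_nil (by omega)]
    simp
  | succ fuel ih =>
    intro k hk hle
    by_cases hcase : cs.length ≤ k
    · have : k = cs.length := by omega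
      subst this
      rw [PySem.List.pyRange_one_eq_nil (by omega)]
      simp
    · have hklt : k < cs.length := by omega
      rw [PySem.List.pyRange_one_cons (by exact_mod_cast hklt), List.foldl_cons]
      have hc : ((k : Int) + 1) = ((k + 1 : Nat) : Int) := by push_cast; ring
      rw [hc, pvAInner_eq cs k hklt cs.length (k + 1) (by omega) (by omega)]
      have hrep : List.replicate (cs.length - k) (0 : Int) = 0 :: List.replicate (cs.length - (k + 1)) 0 := by
        rw [← List.replicate_succ]
        congr 1
        omega
      rw [hrep]
      by_cases hz : pvFd (pvCh cs k) (cs.drop (k + 1)) = 0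
      · rw [if_pos (by exact hz)]
        have : pvCore cs k ++ 0 :: List.replicate (cs.length - (k + 1)) 0 =
            pvCore cs (k + 1) ++ List.replicate (cs.length - (k + 1)) 0 := by
          rw [pvCore_succ]
          simp [pvFdAt, hz]
        rw [this, ih (k + 1) (by omega) (by omega)]
      · rw [if_neg (by exact hz)]
        have hlen : (pvCore cs k).length = k := by simp [pvCore]
        have harg : (((k + 1 : Nat) : Int)) + pvFd (pvCh cs k) (cs.drop (k + 1)) - 1 - (k : Int) =
            pvFd (pvCh cs k) (cs.drop (k + 1)) := by push_cast; ring
        rw [harg, pvSet_mid (pvCore cs k) k hlen]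
        have : pvCore cs k ++ pvFd (pvCh cs k) (cs.drop (k + 1)) :: List.replicate (cs.length - (k + 1)) 0 =
            pvCore cs (k + 1) ++ List.replicate (cs.length - (k + 1)) 0 := by
          rw [pvCore_succ]
          simp [pvFdAt]
        rw [this, ih (k + 1) (by omega) (by omega)]

-- pvFdAt at the last index is 0 (nothing follows)
theorem pvFdAt_last (cs : List Char) (_h : cs.length ≠ 0) : pvFdAt cs (cs.length - 1) = 0 := by
  rw [pvFdAt, List.drop_eq_nil_of_le (by omega)]
  rfl

theorem pvTail_cons (cs : List Char) (k : Nat) (h : k < cs.length) :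
    pvTail cs k = pvFdAt cs k :: pvTail cs (k + 1) := by
  have hnk : cs.length - k = (cs.length - (k + 1)) + 1 := by omega
  rw [pvTail, hnk, List.range_succ_eq_map]
  simp only [List.map_cons, List.map_map, Nat.add_zero]
  rw [pvTail]
  congr 1
  refine List.map_congr_left (fun t _ => ?_)
  simp only [Function.comp]
  congr 1
  omega

-- B's backward recurrence for pvFdAt
theorem pvFdAt_rec (cs : List Char) (i : Nat) (h : i + 1 < cs.length) :
    pvFdAt cs i =
      if pvCh cs (i + 1) ≠ pvCh cs i then 1
      else if pvFdAt cs (i + 1) = 0 then 0 else pvFdAt cs (i + 1) + 1 := by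
  rw [pvFdAt, pvDrop_cons cs (i + 1) h]
  by_cases hne : pvCh cs (i + 1) = pvCh cs i
  · have htl : pvFd (pvCh cs i) (cs.drop (i + 1 + 1)) = pvFdAt cs (i + 1) := by
      rw [pvFdAt, hne]
    simp [pvFd, hne, htl]
  · simp [pvFd, hne]

-- B's backward loop: starting with indices ≥ k already holding their pvFdAt values,
-- the countdown over k-1, …, 0 completes the whole list of pvFdAt values
theorem pvBBack (cs : List Char) (hn : 1 ≤ cs.length) :
    ∀ (k : Nat), k ≤ cs.length - 1 →
    ((PySem.List.pyRange ((k : Int) - 1) (-1) (-1)).foldl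
      (fun hp i =>
        if PySem.List.pyGet? cs i ≠ PySem.List.pyGet? cs (i + 1) then
          PySem.List.pySetD hp i 1
        else if PySem.List.pyGetD hp (i + 1) 0 ≠ 0 then
          PySem.List.pySetD hp i (PySem.List.pyGetD hp (i + 1) 0 + 1)
        else hp)
      (List.replicate k 0 ++ pvTail cs k)) = pvCore cs cs.length := by
  intro k
  induction k with
  | zero =>
    intro _
    rw [PySem.List.pyRange_neg_one_eq_nil (by norm_num)]
    simp only [List.foldl_nil, List.replicate_zero, List.nil_append]
    rw [pvTail, pvCore, Nat.sub_zero]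
    exact List.map_congr_left (fun t _ => by rw [Nat.zero_add])
  | succ k ih =>
    intro hk
    have hk1 : k + 1 < cs.length := by omega
    have hkc : ((k + 1 : Nat) : Int) - 1 = (k : Nat) := by push_cast; ring
    rw [hkc, PySem.List.pyRange_neg_one_cons (by omega), List.foldl_cons]
    have hget : PySem.List.pyGet? cs (k : Int) = some (pvCh cs k) := pvGet_getD cs k (by omega)
    have hc1 : ((k : Int) + 1) = ((k + 1 : Nat) : Int) := by push_cast; ring
    have hget1 : PySem.List.pyGet? cs ((k : Int) + 1) = some (pvCh cs (k + 1)) := by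
      rw [hc1]; exact pvGet_getD cs (k + 1) hk1
    have htail1 : pvTail cs (k + 1) = pvFdAt cs (k + 1) :: pvTail cs (k + 2) := pvTail_cons cs (k + 1) hk1
    have hp0 : List.replicate (k + 1) (0 : Int) ++ pvTail cs (k + 1) =
        (List.replicate k 0 ++ [(0 : Int)]) ++ pvTail cs (k + 1) := by rw [← List.replicate_succ']
    have hgetmid : PySem.List.pyGetD (List.replicate (k + 1) (0 : Int) ++ pvTail cs (k + 1)) ((k : Int) + 1) 0 =
        pvFdAt cs (k + 1) := by
      rw [hc1, PySem.List.pyGetD_natCast, htail1]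
      exact pvGet_mid (List.replicate (k + 1) 0) (k + 1) (by simp) _ _
    have hsetv : ∀ v : Int, PySem.List.pySetD (List.replicate (k + 1) (0 : Int) ++ pvTail cs (k + 1)) (k : Int) v =
        List.replicate k 0 ++ v :: pvTail cs (k + 1) := by
      intro v
      rw [PySem.List.pySetD_natCast, hp0, List.append_assoc, List.singleton_append,
        pvSet_mid (List.replicate k 0) k (by simp)]
    have hrec := pvFdAt_rec cs k hk1
    by_cases hne : pvCh cs (k + 1) = pvCh cs k
    · rw [if_neg (by simp [hget, hget1, hne])]
      by_cases hz : pvFdAt cs (k + 1) = 0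
      · rw [if_neg (by simp [hgetmid, hz])]
        have hfk : pvFdAt cs k = 0 := by rw [hrec, if_neg (by simp [hne]), if_pos hz]
        have : List.replicate (k + 1) (0 : Int) ++ pvTail cs (k + 1) =
            List.replicate k 0 ++ pvTail cs k := by
          rw [pvTail_cons cs k (by omega), hfk, hp0, List.append_assoc, List.singleton_append]
        rw [this, ih (by omega)]
      · rw [if_pos (by simp [hgetmid, hz]), hgetmid, hsetv]
        have hfk : (pvFdAt cs (k + 1) + 1) :: pvTail cs (k + 1) = pvTail cs k := by
          rw [pvTail_cons cs k (by omega), hrec, if_neg (by simp [hne]), if_neg hz]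
        rw [hfk, ih (by omega)]
    · rw [if_pos (by rw [hget, hget1]; simp; exact fun e => hne e.symm), hsetv]
      have hfk : (1 : Int) :: pvTail cs (k + 1) = pvTail cs k := by
        rw [pvTail_cons cs k (by omega), hrec, if_pos hne]
      rw [hfk, ih (by omega)]

theorem pvSetD_neg_one (xs : List Int) (x v : Int) :
    PySem.List.pySetD (xs ++ [x]) (-1) v = xs ++ [v] := by
  have h : PySem.List.pyIdx? (xs.length + 1) (-1) = some xs.length := by
    simp [PySem.List.pyIdx?]
  simp [PySem.List.pySetD, PySem.List.pySet?, h, List.set_append_right]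

-- A's result: pvCore with the last entry bumped to 1
theorem pvA_eq (seq : String) (h : seq.toList.length ≠ 0) :
    get_hp_lengths seq = pvCore seq.toList (seq.toList.length - 1) ++ [1] := by
  unfold get_hp_lengths
  simp only [if_pos h]
  have hzero : pvCore seq.toList 0 ++ List.replicate (seq.toList.length - 0) (0 : Int) =
      List.replicate seq.toList.length 0 := by
    simp [pvCore]
  have houter := pvOuter_eq seq.toList seq.toList.length 0 (by omega) (by omega)
  rw [hzero] at houter
  have hc0 : (((0 : Nat)) : Int) = (0 : Int) := by norm_num
  rw [hc0] at houter
  rw [houter]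
  have hsucc : pvCore seq.toList seq.toList.length =
      pvCore seq.toList (seq.toList.length - 1) ++ [pvFdAt seq.toList (seq.toList.length - 1)] := by
    rw [show seq.toList.length = (seq.toList.length - 1) + 1 by omega] at houter ⊢
    exact pvCore_succ _ _
  rw [hsucc, pvFdAt_last seq.toList h, PySem.List.pyGetD_neg_one_append_singleton, pvSetD_neg_one]
  norm_num

-- B's result: the same list
theorem pvB_eq (seq : String) (h : seq.toList.length ≠ 0) :
    get_hp_lengths_alt seq = pvCore seq.toList (seq.toList.length - 1) ++ [1] := by
  unfold get_hp_lengths_alt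
  simp only [if_pos h]
  have hinit : List.replicate seq.toList.length (0 : Int) =
      List.replicate (seq.toList.length - 1) 0 ++ pvTail seq.toList (seq.toList.length - 1) := by
    have htail : pvTail seq.toList (seq.toList.length - 1) = [0] := by
      rw [pvTail_cons seq.toList (seq.toList.length - 1) (by omega),
        pvFdAt_last seq.toList h, pvTail,
        show seq.toList.length - (seq.toList.length - 1 + 1) = 0 from by omega]
      simp
    rw [htail, show seq.toList.length = (seq.toList.length - 1) + 1 by omega, ← List.replicate_succ']
    simp
  have hrange : ((seq.toList.length : Int)) - 2 = (((seq.toList.length - 1 : Nat)) : Int) - 1 := by omega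
  rw [hinit, hrange, pvBBack seq.toList (by omega) (seq.toList.length - 1) (by omega)]
  have hsucc : pvCore seq.toList seq.toList.length =
      pvCore seq.toList (seq.toList.length - 1) ++ [pvFdAt seq.toList (seq.toList.length - 1)] := by
    rw [show seq.toList.length = (seq.toList.length - 1) + 1 by omega]
    exact pvCore_succ _ _
  rw [hsucc, pvFdAt_last seq.toList h, PySem.List.pyGetD_neg_one_append_singleton, pvSetD_neg_one]
  norm_num

-- ===== VERDICT (by name: the statement is the Claim_ definition above) =====
theorem get_hp_lengths_spec : Claim_equal_get_hp_lengths := by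
  unfold Claim_equal_get_hp_lengths
  intro seq _
  unfold Spec_get_hp_lengths
  by_cases h : seq.toList.length = 0
  · unfold get_hp_lengths get_hp_lengths_alt
    simp [h, PySem.List.pyRange_one_eq_nil, PySem.List.pyRange_neg_one_eq_nil]
  · rw [pvA_eq seq h, pvB_eq seq h]
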